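-- pv_equiv track=rewrite | github.com/thelpix/tareaIP | Python/simulacro/parcial2.py | pos_umbral
-- ===== SOURCE A (Python) =====
-- def pos_umbral(s : list[int], u : list[int]) -> int:
--     res : int = 0
--     for i in range(len(s)):
--         if s[i] >= 0:
--             res += s[i]
--         if res > u:
--             return i
--     return -1
-- ===== SOURCE B (Python) =====
-- def pos_umbral(s, u):
--     # Pass 1: prefix sums of the non-negative (clamped) values.
--     prefix = []
--     t = 0
--     for x in s:
--         t += max(x, 0)
--         prefix.append(t)
--     # Pass 2: prefix is nondecreasing, so binary-search the first index > u.
--     lo, hi = 0, len(prefix)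
--     while lo < hi:
--         mid = (lo + hi) // 2
--         if prefix[mid] > u:
--             hi = mid
--         else:
--             lo = mid + 1
--     return lo if lo < len(prefix) else -1
-- ===== Notes on version B (the rewrite author's own statement) =====
-- stated objective: alternative
-- what changed: Replaces the fused accumulate-and-check loop by two phases: build the clamped prefix-sum table, then binary-search (the table is monotone) for the first entry exceeding u.
import Mathlib
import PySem

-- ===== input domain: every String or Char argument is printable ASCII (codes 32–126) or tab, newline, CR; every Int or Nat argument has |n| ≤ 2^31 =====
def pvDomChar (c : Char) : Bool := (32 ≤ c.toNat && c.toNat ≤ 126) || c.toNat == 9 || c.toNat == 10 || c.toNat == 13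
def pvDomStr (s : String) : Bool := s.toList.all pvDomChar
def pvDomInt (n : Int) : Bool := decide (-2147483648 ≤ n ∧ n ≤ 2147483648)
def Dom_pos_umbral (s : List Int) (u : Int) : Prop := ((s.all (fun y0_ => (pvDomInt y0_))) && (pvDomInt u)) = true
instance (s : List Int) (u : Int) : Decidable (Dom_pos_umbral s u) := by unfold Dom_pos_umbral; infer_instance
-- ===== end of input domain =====

-- B replaces A's fused accumulate-and-check loop by two phases — build the clamped
-- prefix-sum table, then binary-search it (it is monotone) for the first entry > u
-- — a genuinely different algorithm of the same overall cost (objective: alternative).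


-- ===== PORT A =====
-- A's for-loop over the indices of s, carrying the running total `res`;
-- the early `return i` becomes returning the current index counter.
def posA_go (u : Int) : List Int → Int → Int → Int
  | [], _, _ => -1
  | x :: rest, i, res =>
    let res' := if x ≥ 0 then res + x else res
    if res' > u then i else posA_go u rest (i + 1) res'

def pos_umbral (s : List Int) (u : Int) : Int := posA_go u s 0 0

-- ===== PORT B =====
-- pass 1 of Source B: prefix sums of max(x, 0)
def buildPrefix (t : Int) : List Int → List Int
  | [] => []
  | x :: rest => (t + max x 0) :: buildPrefix (t + max x 0) rest

-- pass 2 of Source B: binary search for the first index with prefix[mid] > u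
def bsearch (p : List Int) (u : Int) (lo hi : Nat) : Nat :=
  if _h : lo < hi then
    -- mid = (lo + hi) // 2, written inline
    if p.getD ((lo + hi) / 2) 0 > u then bsearch p u lo ((lo + hi) / 2)
    else bsearch p u ((lo + hi) / 2 + 1) hi
  else lo
termination_by hi - lo
decreasing_by all_goals omega

def pos_umbral_alt (s : List Int) (u : Int) : Int :=
  let pref := buildPrefix 0 s
  let lo := bsearch pref u 0 pref.length
  if lo < pref.length then (lo : Int) else -1

-- ===== PRECONDITION & SPEC =====
def Spec_pos_umbral (s : List Int) (u : Int) (out : Int) : Prop := out = pos_umbral_alt s u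
instance (s : List Int) (u : Int) (out : Int) : Decidable (Spec_pos_umbral s u out) := by unfold Spec_pos_umbral; infer_instance

-- ===== CLAIM (what is proved, stated in full; the proofs are below) =====
def Claim_equal_pos_umbral : Prop := ∀ (s : List Int) (u : Int), Dom_pos_umbral s u → Spec_pos_umbral s u (pos_umbral s u)

-- ===== LEMMAS AND PROOFS =====

-- `tw u p` = length of the leading block of entries ≤ u: the common reference point.
def tw (u : Int) : List Int → Nat
  | [] => 0
  | x :: rest => if x > u then 0 else tw u rest + 1

theorem tw_le_length (u : Int) (p : List Int) : tw u p ≤ p.length := by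
  induction p with
  | nil => simp [tw]
  | cons x rest ih => simp only [tw]; split <;> simp <;> omega

theorem tw_lt (u : Int) (p : List Int) : ∀ j, j < tw u p → p.getD j 0 ≤ u := by
  induction p with
  | nil => simp [tw]
  | cons x rest ih =>
    intro j hj
    simp only [tw] at hj
    split at hj
    · omega
    · cases j with
      | zero => simpa using by omega
      | succ k => exact ih k (by omega)

theorem tw_hit (u : Int) (p : List Int) (h : tw u p < p.length) : p.getD (tw u p) 0 > u := by
  induction p with
  | nil => simp [tw] at h
  | cons x rest ih =>
    by_cases hx : x > u
    · simp [tw, hx]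
    · simp only [tw, if_neg hx, List.length_cons] at h ⊢
      simpa using ih (by omega)

-- A's loop computes the first index whose clamped prefix sum exceeds u.
theorem posA_char (u : Int) (l : List Int) : ∀ (res i : Int),
    posA_go u l i res =
      (if tw u (buildPrefix res l) < (buildPrefix res l).length
        then i + (tw u (buildPrefix res l) : Int) else -1) := by
  induction l with
  | nil => intro res i; simp [posA_go, buildPrefix, tw]
  | cons x rest ih =>
    intro res i
    have hstep : (if x ≥ 0 then res + x else res) = res + max x 0 := by
      split <;> omega
    simp only [posA_go, buildPrefix, hstep]
    by_cases hgt : res + max x 0 > u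
    · simp [tw, hgt]
    · have : ¬ (res + max x 0 > u) := hgt
      simp only [this, if_neg, if_false]
      rw [ih (res + max x 0) (i + 1)]
      simp only [tw, List.length_cons, if_neg this]
      have hle := tw_le_length u (buildPrefix (res + max x 0) rest)
      by_cases hlt : tw u (buildPrefix (res + max x 0) rest) < (buildPrefix (res + max x 0) rest).length
      · rw [if_pos hlt, if_pos (by omega)]
        push_cast; ring
      · rw [if_neg hlt, if_neg (by omega)]

-- every element of buildPrefix t l is ≥ t
theorem buildPrefix_ge (t : Int) (l : List Int) : ∀ y ∈ buildPrefix t l, t ≤ y := by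
  induction l generalizing t with
  | nil => simp [buildPrefix]
  | cons x rest ih =>
    intro y hy
    simp only [buildPrefix, List.mem_cons] at hy
    rcases hy with rfl | hy
    · have := le_max_right x 0; omega
    · have := ih (t + max x 0) y hy
      have := le_max_right x 0; omega

theorem buildPrefix_pairwise (t : Int) (l : List Int) :
    (buildPrefix t l).Pairwise (· ≤ ·) := by
  induction l generalizing t with
  | nil => simp [buildPrefix]
  | cons x rest ih =>
    simp only [buildPrefix, List.pairwise_cons]
    exact ⟨fun y hy => buildPrefix_ge _ _ y hy, ih _⟩

theorem pairwise_getD_mono (p : List Int) (hp : p.Pairwise (· ≤ ·)) :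
    ∀ i j, i ≤ j → j < p.length → p.getD i 0 ≤ p.getD j 0 := by
  intro i j hij hj
  rcases Nat.eq_or_lt_of_le hij with rfl | hlt
  · exact le_refl _
  · have h := (List.pairwise_iff_getElem.mp hp) i j (by omega) hj hlt
    rw [List.getD_eq_getElem p 0 (by omega), List.getD_eq_getElem p 0 hj]
    exact h

-- the binary search returns exactly the leading-block length tw
theorem bsearch_eq_tw (p : List Int) (u : Int) (hp : p.Pairwise (· ≤ ·)) :
    ∀ (n lo hi : Nat), hi - lo ≤ n → lo ≤ hi → hi ≤ p.length →
    lo ≤ tw u p → tw u p ≤ hi → bsearch p u lo hi = tw u p := by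
  intro n
  induction n with
  | zero =>
    intro lo hi h1 _ _ hlo htw
    rw [bsearch, dif_neg (by omega)]
    omega
  | succ n ih =>
    intro lo hi h1 h2 hhi hlo htw
    rw [bsearch]
    by_cases h : lo < hi
    · rw [dif_pos h]
      by_cases htest : p.getD ((lo + hi) / 2) 0 > u
      · rw [if_pos htest]
        refine ih lo ((lo + hi) / 2) (by omega) (by omega) (by omega) hlo ?_
        by_contra hc
        have h1' : p.getD ((lo + hi) / 2) 0 ≤ u := tw_lt u p _ (by omega)
        omega
      · rw [if_neg htest]
        refine ih ((lo + hi) / 2 + 1) hi (by omega) (by omega) hhi ?_ htw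
        by_contra hc
        have htwlt : tw u p < p.length := by omega
        have hhit := tw_hit u p htwlt
        have hmono := pairwise_getD_mono p hp (tw u p) ((lo + hi) / 2) (by omega) (by omega)
        omega
    · rw [dif_neg h]; omega

-- ===== VERDICT (by name: the statement is the Claim_ definition above) =====
theorem pos_umbral_spec : Claim_equal_pos_umbral := by
  intro s u _
  unfold Spec_pos_umbral pos_umbral
  show posA_go u s 0 0 =
    (if bsearch (buildPrefix 0 s) u 0 (buildPrefix 0 s).length < (buildPrefix 0 s).length
      then (↑(bsearch (buildPrefix 0 s) u 0 (buildPrefix 0 s).length) : Int) else -1)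
  rw [posA_char]
  have hP := buildPrefix_pairwise 0 s
  have hle := tw_le_length u (buildPrefix 0 s)
  rw [bsearch_eq_tw _ u hP (buildPrefix 0 s).length 0 _ (by omega) (by omega) le_rfl (by omega) hle]
  split <;> simp
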